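-- pv_equiv track=rewrite | github.com/bo40/RTTY | rtty/window_decoder.py | filter_window_vals
-- ===== SOURCE A (Python) =====
-- def filter_window_vals(window_vals):
--   prev_bit = 0
--   start_time = 0
--
--   for (mk, sp, time) in window_vals:
--     if mk > sp:
--       bit = 1
--     else:
--       bit = 0
--     if (bit != prev_bit):
--       yield (prev_bit, time - start_time)
--       start_time = time
--       prev_bit = bit
--   yield (prev_bit, time - start_time + 1)
-- ===== SOURCE B (Python) =====
-- def filter_window_vals(window_vals):
--     # Pre_ excludes the empty list, on which A raises UnboundLocalError
--     # (this B raises IndexError on the final yield instead).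
--     bits = [((1 if mk > sp else 0), t) for (mk, sp, t) in window_vals]
--     prev_bit = 0
--     start_time = 0
--     n = len(bits)
--     i = 0
--     while i < n:
--         j = i + 1
--         while j < n and bits[j][0] == bits[i][0]:
--             j += 1
--         b, t0 = bits[i]
--         if b != prev_bit:
--             yield (prev_bit, t0 - start_time)
--             start_time = t0
--             prev_bit = b
--         i = j
--     yield (prev_bit, bits[-1][1] - start_time + 1)
-- ===== Notes on version B (the rewrite author's own statement) =====
-- stated objective: alternative
-- what changed: Replaces A's per-element transition loop by a two-phase run-length scan: first materialize the (bit, time) list, then an outer loop that jumps run by run (inner scan finds each run boundary) and emits a pair only at boundaries whose bit differs from the previously emitted bit.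
import Mathlib
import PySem

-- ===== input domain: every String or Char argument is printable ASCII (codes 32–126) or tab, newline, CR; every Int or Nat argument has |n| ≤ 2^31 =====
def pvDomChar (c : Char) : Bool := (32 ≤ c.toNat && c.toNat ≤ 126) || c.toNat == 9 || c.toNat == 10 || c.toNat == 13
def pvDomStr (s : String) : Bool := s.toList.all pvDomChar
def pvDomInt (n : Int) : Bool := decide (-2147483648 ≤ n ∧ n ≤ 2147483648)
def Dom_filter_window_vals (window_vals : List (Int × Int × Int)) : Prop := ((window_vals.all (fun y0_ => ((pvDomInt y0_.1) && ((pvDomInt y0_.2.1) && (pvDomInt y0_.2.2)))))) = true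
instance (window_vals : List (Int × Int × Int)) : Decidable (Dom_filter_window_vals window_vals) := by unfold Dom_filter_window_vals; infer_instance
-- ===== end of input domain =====

-- B re-decomposes A's per-element transition loop as a two-phase run-length scan
-- (materialize the bit list, then jump run by run); same O(n) cost, alternative structure.
-- Both programs raise on empty input (A: UnboundLocalError, B: IndexError), excluded by Pre_.

-- ===== PORT A =====
-- A's loop state: (yielded pairs so far, prev_bit, start_time, time); `time` leaks out of the loop.
def fwvStepA (s : List (Int × Int) × Int × Int × Int) (p : Int × Int × Int) :
    List (Int × Int) × Int × Int × Int :=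
  let bit : Int := if p.1 > p.2.1 then 1 else 0
  if bit ≠ s.2.1 then (s.1 ++ [(s.2.1, p.2.2 - s.2.2.1)], bit, p.2.2, p.2.2)
  else (s.1, s.2.1, s.2.2.1, p.2.2)

def filter_window_vals (window_vals : List (Int × Int × Int)) : List (Int × Int) :=
  let st := window_vals.foldl fwvStepA ([], 0, 0, 0)
  st.1 ++ [(st.2.1, st.2.2.2 - st.2.2.1 + 1)]

-- ===== PORT B =====
-- bits = [(1 if mk > sp else 0, t) for (mk, sp, t) in window_vals]
def fwvBits (window_vals : List (Int × Int × Int)) : List (Int × Int) :=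
  window_vals.map (fun p => ((if p.1 > p.2.1 then (1 : Int) else 0), p.2.2))

-- Source B's outer while loop: each step consumes one whole run of equal bits
-- (the inner `while j < n and bits[j][0] == bits[i][0]` scan = dropWhile on the rest),
-- emitting a pair at each run boundary whose bit differs from prev_bit.
def fwvRuns : List (Int × Int) → Int → Int → List (Int × Int) × Int × Int
  | [], pb, st => ([], pb, st)
  | (b, t0) :: rest, pb, st =>
    let rest' := rest.dropWhile (fun q => q.1 == b)
    if b ≠ pb then
      let r := fwvRuns rest' b t0
      ((pb, t0 - st) :: r.1, r.2)
    else fwvRuns rest' pb st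
termination_by l => l.length
decreasing_by
  · exact Nat.lt_succ_of_le (List.length_dropWhile_le _ _)
  · exact Nat.lt_succ_of_le (List.length_dropWhile_le _ _)

def filter_window_vals_alt (window_vals : List (Int × Int × Int)) : List (Int × Int) :=
  let bits := fwvBits window_vals
  match bits.getLast? with   -- bits[-1]; none = IndexError on empty input, excluded by Pre_
  | none => []
  | some last =>
    let r := fwvRuns bits 0 0
    r.1 ++ [(r.2.1, last.2 - r.2.2 + 1)]

-- ===== PRECONDITION & SPEC =====
-- A raises UnboundLocalError on the empty list (the final yield reads the loop variable
-- `time` that was never bound); Pre_ excludes exactly that input.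
def Pre_filter_window_vals (window_vals : List (Int × Int × Int)) : Prop := window_vals ≠ []
instance (window_vals : List (Int × Int × Int)) : Decidable (Pre_filter_window_vals window_vals) := by unfold Pre_filter_window_vals; infer_instance
def pvWitness_filter_window_vals : (List (Int × Int × Int)) := [(2, 1, 5), (0, 3, 7)]
def Spec_filter_window_vals (window_vals : List (Int × Int × Int)) (out : List (Int × Int)) : Prop := out = filter_window_vals_alt window_vals
instance (window_vals : List (Int × Int × Int)) (out : List (Int × Int)) : Decidable (Spec_filter_window_vals window_vals out) := by unfold Spec_filter_window_vals; infer_instance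

-- ===== CLAIM (what is proved, stated in full; the proofs are below) =====
def Claim_equal_filter_window_vals : Prop := ∀ (window_vals : List (Int × Int × Int)), Dom_filter_window_vals window_vals → Pre_filter_window_vals window_vals → Spec_filter_window_vals window_vals (filter_window_vals window_vals)

-- ===== LEMMAS AND PROOFS =====

-- A's loop step restated on the bit list (proof-side only).
def fwvStepB (s : List (Int × Int) × Int × Int × Int) (q : Int × Int) :
    List (Int × Int) × Int × Int × Int :=
  if q.1 ≠ s.2.1 then (s.1 ++ [(s.2.1, q.2 - s.2.2.1)], q.1, q.2, q.2)
  else (s.1, s.2.1, s.2.2.1, q.2)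

-- the time of the last element, default tm
def fwvLastT (L : List (Int × Int)) (tm : Int) : Int :=
  match L.getLast? with
  | none => tm
  | some q => q.2

theorem fwv_foldA_eq_foldB (w : List (Int × Int × Int))
    (s : List (Int × Int) × Int × Int × Int) :
    w.foldl fwvStepA s = (fwvBits w).foldl fwvStepB s := by
  induction w generalizing s with
  | nil => rfl
  | cons p rest ih =>
    simp only [fwvBits, List.map_cons, List.foldl_cons] at *
    rw [ih]
    rfl

theorem fwvLastT_cons (q : Int × Int) (L : List (Int × Int)) (tm : Int) :
    fwvLastT (q :: L) tm = fwvLastT L q.2 := by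
  cases L with
  | nil => simp [fwvLastT]
  | cons h t =>
    simp only [fwvLastT, List.getLast?_cons_cons]
    cases hx : (h :: t).getLast? with
    | none => simp [List.getLast?_eq_none_iff] at hx
    | some r => rfl

theorem fwvLastT_append (X Y : List (Int × Int)) (tm : Int) :
    fwvLastT (X ++ Y) tm = fwvLastT Y (fwvLastT X tm) := by
  induction X generalizing tm with
  | nil => rfl
  | cons q X' ih => rw [List.cons_append, fwvLastT_cons, fwvLastT_cons, ih]

-- folding A's step over a run of bits equal to prev_bit only advances `time`
theorem fwv_skip_run (L : List (Int × Int)) (acc : List (Int × Int)) (pb st tm : Int)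
    (h : ∀ q ∈ L, q.1 = pb) :
    L.foldl fwvStepB (acc, pb, st, tm) = (acc, pb, st, fwvLastT L tm) := by
  induction L generalizing tm with
  | nil => rfl
  | cons q L' ih =>
    have hq : q.1 = pb := h q (by simp)
    rw [List.foldl_cons, fwvLastT_cons]
    have hstep : fwvStepB (acc, pb, st, tm) q = (acc, pb, st, q.2) := by
      simp [fwvStepB, hq]
    rw [hstep]
    exact ih q.2 (fun r hr => h r (by simp [hr]))

-- main invariant: A's fold over the bit list computes exactly B's run scan
theorem fwv_main (n : ℕ) : ∀ (L : List (Int × Int)), L.length ≤ n →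
    ∀ (acc : List (Int × Int)) (pb st tm : Int),
    L.foldl fwvStepB (acc, pb, st, tm) =
      (acc ++ (fwvRuns L pb st).1, (fwvRuns L pb st).2.1, (fwvRuns L pb st).2.2,
       fwvLastT L tm) := by
  induction n with
  | zero =>
    intro L hL acc pb st tm
    have : L = [] := List.length_eq_zero_iff.mp (Nat.le_zero.mp hL)
    subst this; simp [fwvRuns, fwvLastT]
  | succ m ih =>
    intro L hL acc pb st tm
    match L with
    | [] => simp [fwvRuns, fwvLastT]
    | (b, t0) :: rest =>
      have hsplit : rest = rest.takeWhile (fun q => q.1 == b) ++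
          rest.dropWhile (fun q => q.1 == b) := (List.takeWhile_append_dropWhile).symm
      have hrun : ∀ q ∈ rest.takeWhile (fun q => q.1 == b), q.1 = b := by
        intro q hq
        exact by simpa using List.mem_takeWhile_imp hq
      have hlen : (rest.dropWhile (fun q => q.1 == b)).length ≤ m := by
        have h1 := List.length_dropWhile_le (fun q : Int × Int => q.1 == b) rest
        have h2 : rest.length ≤ m := by simpa using Nat.succ_le_succ_iff.mp hL
        omega
      rw [List.foldl_cons]
      by_cases hb : b ≠ pb
      · have hstep : fwvStepB (acc, pb, st, tm) (b, t0) =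
            (acc ++ [(pb, t0 - st)], b, t0, t0) := by simp [fwvStepB, hb]
        rw [hstep]
        conv_lhs => rw [hsplit]
        rw [List.foldl_append,
          fwv_skip_run _ _ b t0 t0 hrun,
          ih _ hlen]
        have hr : fwvRuns ((b, t0) :: rest) pb st =
            ((pb, t0 - st) :: (fwvRuns (rest.dropWhile (fun q => q.1 == b)) b t0).1,
             (fwvRuns (rest.dropWhile (fun q => q.1 == b)) b t0).2) := by
          rw [fwvRuns]; simp [hb]
        rw [hr]
        refine Prod.ext ?_ (Prod.ext rfl (Prod.ext rfl ?_))
        · simp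
        · show fwvLastT (rest.dropWhile (fun q => q.1 == b))
              (fwvLastT (rest.takeWhile (fun q => q.1 == b)) t0) =
            fwvLastT ((b, t0) :: rest) tm
          rw [fwvLastT_cons]
          conv_rhs => rw [hsplit]
          rw [fwvLastT_append]
      · push Not at hb
        subst hb
        have hstep : fwvStepB (acc, b, st, tm) (b, t0) = (acc, b, st, t0) := by
          simp [fwvStepB]
        rw [hstep]
        conv_lhs => rw [hsplit]
        rw [List.foldl_append,
          fwv_skip_run _ _ b st t0 hrun,
          ih _ hlen]
        have hr : fwvRuns ((b, t0) :: rest) b st =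
            fwvRuns (rest.dropWhile (fun q => q.1 == b)) b st := by
          rw [fwvRuns]; simp
        rw [hr]
        refine Prod.ext rfl (Prod.ext rfl (Prod.ext rfl ?_))
        show fwvLastT (rest.dropWhile (fun q => q.1 == b))
            (fwvLastT (rest.takeWhile (fun q => q.1 == b)) t0) =
          fwvLastT ((b, t0) :: rest) tm
        rw [fwvLastT_cons]
        conv_rhs => rw [hsplit]
        rw [fwvLastT_append]

-- ===== VERDICT (by name: the statement is the Claim_ definition above) =====
theorem filter_window_vals_spec : Claim_equal_filter_window_vals := by
  intro w _ hpre
  unfold Spec_filter_window_vals filter_window_vals filter_window_vals_alt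
  have hne : fwvBits w ≠ [] := by
    simp [fwvBits]; exact hpre
  have hs : ((fwvBits w).getLast?).isSome := List.getLast?_isSome.mpr hne
  obtain ⟨last, hlast⟩ := Option.isSome_iff_exists.mp hs
  rw [fwv_foldA_eq_foldB, fwv_main (fwvBits w).length _ le_rfl]
  have hlt : fwvLastT (fwvBits w) 0 = last.2 := by simp [fwvLastT, hlast]
  simp [hlast, hlt]
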